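-- pv_equiv track=rewrite | github.com/nurlan6812/ai-story-shorts-agent | main.py | _merge_character_pools
-- ===== SOURCE A (Python) =====
-- def _merge_character_pools(
--     primary: list[dict] | None,
--     secondary: list[dict] | None,
-- ) -> list[dict]:
--     """primary를 우선으로 하고 secondary의 추가 인물만 뒤에 붙인다."""
--     merged: list[dict] = []
--     seen: set[str] = set()
--
--     for pool in (primary or [], secondary or []):
--         if not isinstance(pool, list):
--             continue
--         for source in pool:
--             if not isinstance(source, dict):
--                 continue
--             name = str(source.get("name", "")).strip()
--             desc = str(source.get("description", "")).strip()
--             role = str(source.get("role", "supporting")).strip().lower() or "supporting"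
--             if not name or not desc:
--                 continue
--             key = name.lower()
--             if key in seen:
--                 continue
--             if role not in {"protagonist", "antagonist", "supporting"}:
--                 role = "supporting"
--             merged.append(
--                 {
--                     "name": name,
--                     "description": desc,
--                     "role": role,
--                 }
--             )
--             seen.add(key)
--
--     return merged
-- ===== SOURCE B (Python) =====
-- # Two separate passes: (1) flatten + normalize each entry into a cleaned dict,
-- # (2) dedup keeping the first entry per lowercased name by recursively removing
-- # later duplicates of the head.
--
-- def _clean(source):
--     name = str(source.get("name", "")).strip()
--     desc = str(source.get("description", "")).strip()
--     if not name or not desc: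
--         return None
--     role = str(source.get("role", "supporting")).strip().lower()
--     if role not in ("protagonist", "antagonist", "supporting"):
--         role = "supporting"
--     return {"name": name, "description": desc, "role": role}
--
--
-- def _dedup(entries):
--     if not entries:
--         return []
--     head, rest = entries[0], entries[1:]
--     k = head["name"].lower()
--     return [head] + _dedup([e for e in rest if e["name"].lower() != k])
--
--
-- def _merge_character_pools(primary, secondary):
--     cleaned = []
--     for pool in (primary or [], secondary or []):
--         if not isinstance(pool, list):
--             continue
--         for source in pool:
--             if not isinstance(source, dict):
--                 continue
--             entry = _clean(source)
--             if entry is not None: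
--                 cleaned.append(entry)
--     return _dedup(cleaned)
-- ===== Notes on version B (the rewrite author's own statement) =====
-- stated objective: alternative
-- what changed: A interleaves validation and dedup in one scan with a running seen-set; B first normalizes/filters everything into a cleaned list, then dedups by recursively dropping later entries whose lowercased name matches the head (no seen-set).
import Mathlib
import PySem

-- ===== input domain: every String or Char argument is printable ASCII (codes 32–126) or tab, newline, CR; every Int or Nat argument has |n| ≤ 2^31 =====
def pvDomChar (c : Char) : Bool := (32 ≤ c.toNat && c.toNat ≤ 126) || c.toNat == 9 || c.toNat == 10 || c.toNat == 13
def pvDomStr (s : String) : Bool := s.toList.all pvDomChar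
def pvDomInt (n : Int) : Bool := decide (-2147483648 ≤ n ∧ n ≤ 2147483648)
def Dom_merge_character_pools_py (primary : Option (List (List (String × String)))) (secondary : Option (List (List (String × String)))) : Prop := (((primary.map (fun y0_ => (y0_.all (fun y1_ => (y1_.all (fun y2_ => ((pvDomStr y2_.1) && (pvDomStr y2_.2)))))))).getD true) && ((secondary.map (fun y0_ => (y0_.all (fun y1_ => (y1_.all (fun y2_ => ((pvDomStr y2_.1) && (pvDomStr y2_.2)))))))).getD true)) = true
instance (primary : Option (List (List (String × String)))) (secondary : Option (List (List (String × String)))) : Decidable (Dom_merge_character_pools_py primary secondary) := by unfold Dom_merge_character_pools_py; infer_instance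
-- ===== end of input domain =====

-- B restructures A's single interleaved scan (validate + seen-set dedup in one loop) into two
-- separate passes: normalize/filter everything, then dedup by removing later duplicates of each
-- head; objective: alternative decomposition, same output. A does not mutate its arguments.

-- ===== PORT A =====
-- dict lookup: source.get(k, dflt) = first match in the association list (List.lookup is first-match)
-- isinstance checks of A are vacuous under the declared types and are not ported.
def pvStepA (st : List (List (String × String)) × PySem.Set String)
    (source : List (String × String)) :
    List (List (String × String)) × PySem.Set String :=
  let name := PySem.Str.strip ((source.lookup "name").getD "")
  let desc := PySem.Str.strip ((source.lookup "description").getD "")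
  let role0 := PySem.Str.lower (PySem.Str.strip ((source.lookup "role").getD "supporting"))
  let role := if role0 = "" then "supporting" else role0   -- 'or "supporting"'
  if name = "" ∨ desc = "" then st
  else
    let key := PySem.Str.lower name
    if PySem.Set.contains st.2 key then st
    else
      let role := if role = "protagonist" ∨ role = "antagonist" ∨ role = "supporting" then role
                  else "supporting"
      (st.1 ++ [[("name", name), ("description", desc), ("role", role)]],
       PySem.Set.add st.2 key)

def merge_character_pools_py (primary : Option (List (List (String × String)))) (secondary : Option (List (List (String × String)))) : List (List (String × String)) :=
  (([primary.getD [], secondary.getD []].foldl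
      (fun st pool => pool.foldl pvStepA st)
      ([], PySem.Set.empty))).1

-- ===== PORT B =====
def pvClean (source : List (String × String)) : Option (List (String × String)) :=
  let name := PySem.Str.strip ((source.lookup "name").getD "")
  let desc := PySem.Str.strip ((source.lookup "description").getD "")
  if name = "" ∨ desc = "" then none
  else
    let role0 := PySem.Str.lower (PySem.Str.strip ((source.lookup "role").getD "supporting"))
    let role := if role0 = "protagonist" ∨ role0 = "antagonist" ∨ role0 = "supporting" then role0
                else "supporting"
    some [("name", name), ("description", desc), ("role", role)]

def pvKey (e : List (String × String)) : String :=
  PySem.Str.lower ((e.lookup "name").getD "")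

def pvDedup : List (List (String × String)) → List (List (String × String))
  | [] => []
  | e :: rest =>
      e :: pvDedup (rest.filter (fun x => pvKey x ≠ pvKey e))
  termination_by l => l.length
  decreasing_by
    simp only [List.length_unattach, List.length_cons]
    exact Nat.lt_succ_of_le (le_trans (List.length_filter_le _ _) (by simp))

def merge_character_pools_py_alt (primary : Option (List (List (String × String)))) (secondary : Option (List (List (String × String)))) : List (List (String × String)) :=
  let cleaned :=
    [primary.getD [], secondary.getD []].foldl
      (fun acc pool =>
        pool.foldl (fun acc s => match pvClean s with | some e => acc ++ [e] | none => acc) acc)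
      []
  pvDedup cleaned

-- ===== PRECONDITION & SPEC =====
def Spec_merge_character_pools_py (primary : Option (List (List (String × String)))) (secondary : Option (List (List (String × String)))) (out : List (List (String × String))) : Prop := out = merge_character_pools_py_alt primary secondary
instance (primary : Option (List (List (String × String)))) (secondary : Option (List (List (String × String)))) (out : List (List (String × String))) : Decidable (Spec_merge_character_pools_py primary secondary out) := by unfold Spec_merge_character_pools_py; infer_instance

-- ===== CLAIM (what is proved, stated in full; the proofs are below) =====
def Claim_equal_merge_character_pools_py : Prop := ∀ (primary : Option (List (List (String × String)))) (secondary : Option (List (List (String × String)))), Dom_merge_character_pools_py primary secondary → Spec_merge_character_pools_py primary secondary (merge_character_pools_py primary secondary)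

-- ===== LEMMAS AND PROOFS =====

-- A's inline per-entry work, expressed through B's normalizer.
lemma stepA_eq (st : List (List (String × String)) × PySem.Set String)
    (s : List (String × String)) :
    pvStepA st s =
      match pvClean s with
      | none => st
      | some e =>
          if PySem.Set.contains st.2 (pvKey e) then st
          else (st.1 ++ [e], PySem.Set.add st.2 (pvKey e)) := by
  unfold pvStepA pvClean pvKey
  set name := PySem.Str.strip ((s.lookup "name").getD "") with hn
  set desc := PySem.Str.strip ((s.lookup "description").getD "") with hd
  set role0 := PySem.Str.lower (PySem.Str.strip ((s.lookup "role").getD "supporting")) with hr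
  by_cases h : name = "" ∨ desc = ""
  · simp [h]
  · simp only [h, if_false]
    by_cases h0 : role0 = ""
    · simp [h0, List.lookup]
    · by_cases hw : role0 = "protagonist" ∨ role0 = "antagonist" ∨ role0 = "supporting"
      · simp [h0, hw, List.lookup]
      · simp [h0, hw, List.lookup]

-- B's cleaning fold is filterMap.
lemma cleanFold (l : List (List (String × String)))
    (acc : List (List (String × String))) :
    l.foldl (fun acc s => match pvClean s with | some e => acc ++ [e] | none => acc) acc
      = acc ++ l.filterMap pvClean := by
  induction l generalizing acc with
  | nil => simp
  | cons s l ih =>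
      cases h : pvClean s with
      | none => simp [List.foldl_cons, h, ih]
      | some e => simp [List.foldl_cons, h, ih]

-- Main invariant: A's interleaved scan equals dedup of the cleaned entries not yet seen.
lemma loopA (l : List (List (String × String)))
    (acc : List (List (String × String))) (seen : PySem.Set String) :
    (l.foldl pvStepA (acc, seen)).1
      = acc ++ pvDedup ((l.filterMap pvClean).filter
          (fun e => ! decide (pvKey e ∈ seen))) := by
  induction l generalizing acc seen with
  | nil => simp [pvDedup]
  | cons s l ih =>
      rw [List.foldl_cons, stepA_eq]
      cases h : pvClean s with
      | none => simp only [h, List.filterMap_cons_none, ih]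
      | some e =>
          by_cases hs : pvKey e ∈ seen
          · have hc : PySem.Set.contains seen (pvKey e) = true := by
              simpa [PySem.Set.contains_iff] using hs
            simp [h, hs, ih]
          · have hc : PySem.Set.contains seen (pvKey e) = false := by
              simp [PySem.Set.contains_eq_listContains, hs]
            simp only [h, hc, Bool.false_eq_true, if_false, List.filterMap_cons]
            rw [ih]
            have hfe : (! decide (pvKey e ∈ seen)) = true := by simp [hs]
            simp only [List.filter_cons, hfe, if_true]
            rw [pvDedup]
            simp only [List.append_assoc, List.singleton_append]
            congr 2
            rw [List.filter_filter]
            congr 1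
            apply List.filter_congr
            intro x _
            by_cases hx : pvKey x = pvKey e
            · simp [hx, PySem.Set.mem_add]
            · simp [hx, PySem.Set.mem_add]

-- ===== VERDICT (by name: the statement is the Claim_ definition above) =====
theorem merge_character_pools_py_spec : Claim_equal_merge_character_pools_py := by
  intro primary secondary _
  unfold Spec_merge_character_pools_py merge_character_pools_py merge_character_pools_py_alt
  simp only [List.foldl_cons, List.foldl_nil]
  rw [← List.foldl_append, ← List.foldl_append, show (PySem.Set.empty : PySem.Set String) = [] from rfl]
  rw [loopA, cleanFold]
  simp
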